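-- pv_equiv track=rewrite | github.com/BlakeMcMurray/Coding-Problem-Solutions | Arrays/replaceSpaces.py | replace_spaces_c
-- ===== SOURCE A (Python) =====
-- def replace_spaces_c(s):
--     s_num = 0
--     for i in s:
--         if i == " ":
--             s_num += 1
--
--     s_new = ['']*(len(s)+(s_num))
--     count = 0
--     for i in s:
--         if i == " ":
--             s_new[count] = "#"
--             count += 1
--             s_new[count] = "$"
--             count += 1
--         else:
--             s_new[count] = i
--             count += 1
--
--     return(''.join(s_new))
-- ===== SOURCE B (Python) =====
-- def replace_spaces_c(s):
--     return "#$".join(s.split(" "))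
-- ===== Notes on version B (the rewrite author's own statement) =====
-- stated objective: idiomatic
-- what changed: Replaces the count-then-fill two-pass indexed buffer writing with a single split on the space character and a join of the resulting segments with the replacement sequence.
import Mathlib
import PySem

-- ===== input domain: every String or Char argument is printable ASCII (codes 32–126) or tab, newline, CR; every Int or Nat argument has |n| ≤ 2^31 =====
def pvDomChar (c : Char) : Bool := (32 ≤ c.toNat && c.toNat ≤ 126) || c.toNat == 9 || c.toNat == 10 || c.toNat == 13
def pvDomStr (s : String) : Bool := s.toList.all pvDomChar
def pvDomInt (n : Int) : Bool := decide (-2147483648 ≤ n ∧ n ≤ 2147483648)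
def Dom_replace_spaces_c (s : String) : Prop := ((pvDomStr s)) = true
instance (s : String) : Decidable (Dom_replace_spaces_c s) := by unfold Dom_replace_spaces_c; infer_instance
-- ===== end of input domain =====

-- B replaces A's count-then-fill indexed buffer writing with an idiomatic split/join; equal return values proved for all strings.

-- ===== PORT A =====
-- A: count the spaces, preallocate a buffer of size len+count, fill it left to
-- right with an explicit write index, join with the empty separator.
def replace_spaces_c (s : String) : String :=
  let cs := s.toList
  let s_num : Nat := cs.foldl (fun n c => if c = ' ' then n + 1 else n) 0
  let s_new : List (List Char) := List.replicate (cs.length + s_num) []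
  let res := cs.foldl
    (fun (st : List (List Char) × Nat) c =>
      if c = ' ' then ((st.1.set st.2 ['#']).set (st.2 + 1) ['$'], st.2 + 2)
      else (st.1.set st.2 [c], st.2 + 1)) (s_new, 0)
  String.ofList (PySem.Chars.join [] res.1)

-- ===== PORT B =====
-- B: "#$".join(s.split(" ")), expressed on the PySem.Chars level (exact).
def replace_spaces_c_alt (s : String) : String :=
  String.ofList (PySem.Chars.join ['#', '$'] (PySem.Chars.splitOn s.toList [' ']))

-- ===== PRECONDITION & SPEC =====
def Spec_replace_spaces_c (s : String) (out : String) : Prop := out = replace_spaces_c_alt s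
instance (s : String) (out : String) : Decidable (Spec_replace_spaces_c s out) := by unfold Spec_replace_spaces_c; infer_instance

-- ===== CLAIM (what is proved, stated in full; the proofs are below) =====
def Claim_equal_replace_spaces_c : Prop := ∀ (s : String), Dom_replace_spaces_c s → Spec_replace_spaces_c s (replace_spaces_c s)

-- ===== LEMMAS AND PROOFS =====

-- per-character replacement both programs compute
def pvWrep (c : Char) : List Char := if c = ' ' then ['#', '$'] else [c]

-- the space-separated segments of a char list (spec for s.split(" "))
def pvConsHead (x : List Char) : List (List Char) → List (List Char)
  | [] => [x]
  | y :: ys => (x ++ y) :: ys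

def pvSegs : List Char → List (List Char)
  | [] => [[]]
  | c :: rest => if c = ' ' then [] :: pvSegs rest else pvConsHead [c] (pvSegs rest)

lemma pvSegs_space (rest : List Char) : pvSegs (' ' :: rest) = [] :: pvSegs rest := by
  simp [pvSegs]

lemma pvSegs_char (c : Char) (rest : List Char) (hc : c ≠ ' ') :
    pvSegs (c :: rest) = pvConsHead [c] (pvSegs rest) := by
  simp [pvSegs, hc]

lemma pvSegs_ne_nil (cs : List Char) : pvSegs cs ≠ [] := by
  cases cs with
  | nil => simp [pvSegs]
  | cons c rest =>
    by_cases hc : c = ' '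
    · subst hc; simp [pvSegs_space]
    · rw [pvSegs_char c rest hc]
      cases h : pvSegs rest <;> simp [pvConsHead]

lemma pvGo_eq (cs : List Char) : ∀ (fuel : Nat) (cur : List Char) (acc : List (List Char)),
    cs.length ≤ fuel →
    PySem.Chars.splitOn.go [' '] fuel cs cur acc
      = acc.reverse ++ pvConsHead cur.reverse (pvSegs cs) := by
  induction cs with
  | nil =>
    intro fuel cur acc _
    cases fuel <;> simp [PySem.Chars.splitOn.go, pvSegs, pvConsHead]
  | cons c rest ih =>
    intro fuel cur acc hf
    cases fuel with
    | zero => simp at hf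
    | succ f =>
      by_cases hc : c = ' '
      · subst hc
        rw [show PySem.Chars.splitOn.go [' '] (f+1) (' ' :: rest) cur acc
            = PySem.Chars.splitOn.go [' '] f rest [] (cur.reverse :: acc) by
          simp [PySem.Chars.splitOn.go, List.isPrefixOf]]
        rw [ih f [] (cur.reverse :: acc) (by simpa using hf)]
        obtain ⟨y, ys, hy⟩ := List.exists_cons_of_ne_nil (pvSegs_ne_nil rest)
        simp [pvSegs_space, hy, pvConsHead]
      · have h' : ¬ (' ' = c) := fun h => hc h.symm
        rw [show PySem.Chars.splitOn.go [' '] (f+1) (c :: rest) cur acc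
            = PySem.Chars.splitOn.go [' '] f rest (c :: cur) acc by
          simp [PySem.Chars.splitOn.go, List.isPrefixOf, h']]
        rw [ih f (c :: cur) acc (by simpa using Nat.le_of_succ_le_succ hf)]
        rw [pvSegs_char c rest hc]
        cases hy : pvSegs rest <;> simp [pvConsHead]

lemma pvSplitOn_space (cs : List Char) :
    PySem.Chars.splitOn cs [' '] = pvSegs cs := by
  rw [PySem.Chars.splitOn, pvGo_eq cs (cs.length + 1) [] [] (by omega)]
  obtain ⟨y, ys, hy⟩ := List.exists_cons_of_ne_nil (pvSegs_ne_nil cs)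
  simp [hy, pvConsHead]

lemma pvJoin_segs (cs : List Char) :
    PySem.Chars.join ['#', '$'] (pvSegs cs) = cs.flatMap pvWrep := by
  induction cs with
  | nil => simp [pvSegs, PySem.Chars.join_singleton]
  | cons c rest ih =>
    obtain ⟨y, ys, hy⟩ := List.exists_cons_of_ne_nil (pvSegs_ne_nil rest)
    by_cases hc : c = ' '
    · subst hc
      rw [pvSegs_space, hy, PySem.Chars.join_cons_cons, ← hy, ih]
      simp [pvWrep]
    · rw [pvSegs_char c rest hc, hy]
      rw [hy] at ih
      cases ys with
      | nil =>
        simp only [pvConsHead, PySem.Chars.join_singleton] at ih ⊢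
        simp [pvWrep, hc, ih]
      | cons z zs =>
        simp only [pvConsHead] at ih ⊢
        rw [PySem.Chars.join_cons_cons] at ih ⊢
        rw [show List.flatMap pvWrep (c :: rest) = pvWrep c ++ List.flatMap pvWrep rest from by
          simp, ← ih]
        simp [pvWrep, hc]

-- A-side: the cells A writes into the buffer, per character
def pvCells (cs : List Char) : List (List Char) :=
  cs.flatMap (fun c => if c = ' ' then [['#'], ['$']] else [[c]])

lemma pvCells_space (rest : List Char) :
    pvCells (' ' :: rest) = ['#'] :: ['$'] :: pvCells rest := by
  simp [pvCells]

lemma pvCells_char (c : Char) (rest : List Char) (hc : c ≠ ' ') :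
    pvCells (c :: rest) = [c] :: pvCells rest := by
  simp [pvCells, hc]

lemma pvCount (cs : List Char) : ∀ k : Nat,
    cs.foldl (fun n c => if c = ' ' then n + 1 else n) k = k + cs.countP (· == ' ') := by
  induction cs with
  | nil => simp
  | cons c rest ih =>
    intro k
    by_cases hc : c = ' '
    · subst hc
      simp only [List.foldl_cons, reduceIte, List.countP_cons, ih]
      simp
      omega
    · simp only [List.foldl_cons, if_neg hc, ih, List.countP_cons]
      simp [hc]

lemma pvCells_length (cs : List Char) :
    (pvCells cs).length = cs.length + cs.countP (· == ' ') := by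
  induction cs with
  | nil => simp [pvCells]
  | cons c rest ih =>
    by_cases hc : c = ' '
    · subst hc; simp [pvCells_space, ih]; omega
    · simp [pvCells_char c rest hc, ih, hc]; omega

lemma pvSet_append (done : List (List Char)) (l : List (List Char)) (i : Nat)
    (x : List Char) : (done ++ l).set (done.length + i) x = done ++ l.set i x := by
  induction done with
  | nil => simp
  | cons d ds ih => simp [List.set_cons_succ, Nat.succ_add, ih]

lemma pvLoopA (cs : List Char) : ∀ (done : List (List Char)),
    cs.foldl
      (fun (st : List (List Char) × Nat) c =>
        if c = ' ' then ((st.1.set st.2 ['#']).set (st.2 + 1) ['$'], st.2 + 2)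
        else (st.1.set st.2 [c], st.2 + 1))
      (done ++ List.replicate (pvCells cs).length [], done.length)
      = (done ++ pvCells cs, done.length + (pvCells cs).length) := by
  induction cs with
  | nil => simp [pvCells]
  | cons c rest ih =>
    intro done
    by_cases hc : c = ' '
    · subst hc
      rw [pvCells_space]
      simp only [List.foldl_cons, reduceIte, List.length_cons]
      have h1 : (done ++ List.replicate ((pvCells rest).length + 1 + 1) ([] : List Char)).set
          done.length ['#'] = done ++ ['#'] :: List.replicate ((pvCells rest).length + 1) [] := by
        have := pvSet_append done (List.replicate ((pvCells rest).length + 1 + 1) ([] : List Char)) 0 ['#']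
        simpa [List.replicate_succ] using this
      have h2 : (done ++ ['#'] :: List.replicate ((pvCells rest).length + 1) ([] : List Char)).set
          (done.length + 1) ['$']
          = (done ++ [['#'], ['$']]) ++ List.replicate (pvCells rest).length [] := by
        have := pvSet_append done (['#'] :: List.replicate ((pvCells rest).length + 1) ([] : List Char)) 1 ['$']
        simpa [List.replicate_succ, List.append_assoc] using this
      rw [h1, h2]
      have hih := ih (done ++ [['#'], ['$']])
      simp only [List.length_append, List.length_cons, List.length_nil] at hih
      rw [show done.length + 2 = done.length + (0 + 1 + 1) by omega] at hih ⊢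
      rw [hih]
      simp only [Prod.mk.injEq, List.append_assoc, List.cons_append, List.nil_append]
      exact ⟨trivial, by omega⟩
    · rw [pvCells_char c rest hc]
      simp only [List.foldl_cons, if_neg hc, List.length_cons]
      have h1 : (done ++ List.replicate ((pvCells rest).length + 1) ([] : List Char)).set
          done.length [c] = (done ++ [[c]]) ++ List.replicate (pvCells rest).length [] := by
        have := pvSet_append done (List.replicate ((pvCells rest).length + 1) ([] : List Char)) 0 [c]
        simpa [List.replicate_succ, List.append_assoc] using this
      rw [h1]
      have hih := ih (done ++ [[c]])
      simp only [List.length_append, List.length_cons, List.length_nil] at hih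
      rw [show done.length + 1 = done.length + (0 + 1) by omega] at hih ⊢
      rw [hih]
      simp only [Prod.mk.injEq, List.append_assoc, List.cons_append, List.nil_append]
      exact ⟨trivial, by omega⟩

lemma pvJoin_nil (l : List (List Char)) : PySem.Chars.join [] l = l.flatten := by
  induction l with
  | nil => simp [PySem.Chars.join_nil]
  | cons x xs ih =>
    cases xs with
    | nil => simp [PySem.Chars.join_singleton]
    | cons y ys => rw [PySem.Chars.join_cons_cons, ih]; simp

lemma pvFlatten_cells (cs : List Char) :
    (pvCells cs).flatten = cs.flatMap pvWrep := by
  induction cs with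
  | nil => simp [pvCells]
  | cons c rest ih =>
    by_cases hc : c = ' '
    · subst hc; simp [pvCells_space, ih, pvWrep]
    · simp [pvCells_char c rest hc, ih, pvWrep, hc]

-- ===== VERDICT (by name: the statement is the Claim_ definition above) =====
theorem replace_spaces_c_spec : Claim_equal_replace_spaces_c := by
  intro s _
  show replace_spaces_c s = replace_spaces_c_alt s
  unfold replace_spaces_c replace_spaces_c_alt
  simp only [pvCount]
  have hA := pvLoopA s.toList []
  simp only [List.nil_append, List.length_nil, Nat.zero_add] at hA
  rw [show s.toList.length + (0 + s.toList.countP (· == ' ')) = (pvCells s.toList).length from by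
    rw [pvCells_length]; omega]
  rw [hA, pvJoin_nil, pvFlatten_cells, pvSplitOn_space, pvJoin_segs]
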